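-- pv_equiv track=rewrite | github.com/upatisariputa/python_algorithm | 2/algo02-02.py | calculate
-- ===== SOURCE A (Python) =====
-- def calculate (length_input, count_input, list_input):
--   result_list = []
--   for i in range(0, length_input):
--     for k in range(1, length_input):
--       for j in range(2, length_input):
--         result = list_input[i] + list_input[k] + list_input[j]
--         result_list.append(result)
--   result_list= sorted(list(set(result_list)), reverse=True)
--   answer = result_list[count_input-1]
--   return answer
-- ===== SOURCE B (Python) =====
-- def calculate(length_input, count_input, list_input):
--     group_a = list_input[0:length_input]
--     group_b = list_input[1:length_input]
--     group_c = list_input[2:length_input]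
--     pair_sums = {a + b for a in group_a for b in group_b}
--     triple_sums = sorted({p + c for p in pair_sums for c in group_c}, reverse=True)
--     return triple_sums[count_input - 1]
-- ===== Notes on version B (the rewrite author's own statement) =====
-- stated objective: faster
-- what changed: B slices the three index groups once and builds a distinct pairwise-sum set first, then combines it with the third group in a second pass, instead of A's flat triple loop over index ranges with repeated indexing and a final dedup.
import Mathlib
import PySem

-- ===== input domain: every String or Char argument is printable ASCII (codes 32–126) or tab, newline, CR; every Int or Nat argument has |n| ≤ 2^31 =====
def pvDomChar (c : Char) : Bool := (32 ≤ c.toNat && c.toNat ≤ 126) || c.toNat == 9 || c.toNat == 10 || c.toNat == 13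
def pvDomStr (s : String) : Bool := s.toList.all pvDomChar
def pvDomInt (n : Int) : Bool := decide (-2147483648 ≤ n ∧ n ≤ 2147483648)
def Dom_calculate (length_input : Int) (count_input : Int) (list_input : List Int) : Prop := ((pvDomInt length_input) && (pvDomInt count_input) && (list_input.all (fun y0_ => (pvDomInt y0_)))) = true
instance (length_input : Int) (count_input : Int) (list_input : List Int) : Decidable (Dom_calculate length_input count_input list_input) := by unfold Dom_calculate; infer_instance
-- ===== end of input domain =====

-- B replaces A's flat triple index loop by a two-pass combination of a distinct pairwise-sum set
-- with the third group (objective: faster — fewer sums generated before dedup).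
-- ===== PORT A =====
def calculate (length_input : Int) (count_input : Int) (list_input : List Int) : Int :=
  let result_list :=
    (PySem.List.pyRange 0 length_input 1).foldl (fun acc i =>
      (PySem.List.pyRange 1 length_input 1).foldl (fun acc k =>
        (PySem.List.pyRange 2 length_input 1).foldl (fun acc j =>
          acc ++ [PySem.List.pyGetD list_input i 0 + PySem.List.pyGetD list_input k 0 +
                  PySem.List.pyGetD list_input j 0]) acc) acc) []
  let sorted_list := PySem.List.sorted (PySem.Set.ofList result_list) (fun x => x) true
  PySem.List.pyGetD sorted_list (count_input - 1) 0   -- total form: Pre_ guarantees the index is in range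

-- ===== PORT B =====
def calculate_alt (length_input : Int) (count_input : Int) (list_input : List Int) : Int :=
  let group_a := PySem.List.slice list_input (some 0) (some length_input)
  let group_b := PySem.List.slice list_input (some 1) (some length_input)
  let group_c := PySem.List.slice list_input (some 2) (some length_input)
  let pair_sums := PySem.Set.ofList (group_a.flatMap (fun a => group_b.map (fun b => a + b)))
  let triple_sums := PySem.List.sorted
    (PySem.Set.ofList (pair_sums.flatMap (fun p => group_c.map (fun c => p + c)))) (fun x => x) true
  PySem.List.pyGetD triple_sums (count_input - 1) 0   -- total form: Pre_ guarantees the index is in range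

-- ===== PRECONDITION & SPEC =====
-- the distinct triple sums of the input (a property of the input, used only to state that A's final
-- indexing does not raise)
def pvDistinctSums (length_input : Int) (list_input : List Int) : List Int :=
  PySem.Set.ofList ((PySem.List.pyRange 0 length_input 1).flatMap (fun i =>
    (PySem.List.pyRange 1 length_input 1).flatMap (fun k =>
      (PySem.List.pyRange 2 length_input 1).map (fun j =>
        PySem.List.pyGetD list_input i 0 + PySem.List.pyGetD list_input k 0 +
        PySem.List.pyGetD list_input j 0))))

-- Pre_: exactly where A returns — the loops index only positions < length_input ≤ len(list) and the
-- final index count_input-1 is a valid Python index into the distinct-sum list (else IndexError).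
def Pre_calculate (length_input : Int) (count_input : Int) (list_input : List Int) : Prop :=
  0 ≤ length_input ∧ length_input ≤ list_input.length ∧
  PySem.Raise.InRange (pvDistinctSums length_input list_input).length (count_input - 1)
instance (length_input : Int) (count_input : Int) (list_input : List Int) : Decidable (Pre_calculate length_input count_input list_input) := by unfold Pre_calculate; infer_instance

def pvWitness_calculate : Int × Int × List Int := (4, 2, [1, 2, 3, 4])

def Spec_calculate (length_input : Int) (count_input : Int) (list_input : List Int) (out : Int) : Prop := out = calculate_alt length_input count_input list_input
instance (length_input : Int) (count_input : Int) (list_input : List Int) (out : Int) : Decidable (Spec_calculate length_input count_input list_input out) := by unfold Spec_calculate; infer_instance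

-- ===== CLAIM (what is proved, stated in full; the proofs are below) =====
def Claim_equal_calculate : Prop := ∀ (length_input : Int) (count_input : Int) (list_input : List Int), Dom_calculate length_input count_input list_input → Pre_calculate length_input count_input list_input → Spec_calculate length_input count_input list_input (calculate length_input count_input list_input)

-- ===== LEMMAS AND PROOFS =====

-- membership in a drop/take slice, by absolute index
lemma mem_drop_take {xs : List Int} {d t : Nat} {a : Int} :
    a ∈ (xs.drop d).take t ↔ ∃ m : Nat, ∃ h : m < t ∧ d + m < xs.length, a = xs[d + m]'h.2 := by
  rw [List.mem_iff_getElem]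
  constructor
  · rintro ⟨m, hm, rfl⟩
    rw [List.length_take, List.length_drop, Nat.lt_min] at hm
    refine ⟨m, ⟨hm.1, by omega⟩, by simp [List.getElem_take, List.getElem_drop]⟩
  · rintro ⟨m, ⟨h1, h2⟩, rfl⟩
    refine ⟨m, ?_, ?_⟩
    · rw [List.length_take, List.length_drop, Nat.lt_min]; omega
    · simp [List.getElem_take, List.getElem_drop]

-- the sums A generates and the sums B generates are the same set of integers
lemma sums_mem_iff (L : Int) (xs : List Int) (hL0 : 0 ≤ L) (hLlen : L ≤ xs.length) (x : Int) :
    (x ∈ (PySem.List.pyRange 0 L 1).flatMap (fun i =>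
      (PySem.List.pyRange 1 L 1).flatMap (fun k =>
        (PySem.List.pyRange 2 L 1).map (fun j =>
          PySem.List.pyGetD xs i 0 + PySem.List.pyGetD xs k 0 + PySem.List.pyGetD xs j 0)))) ↔
    (x ∈ (PySem.Set.ofList ((PySem.List.slice xs (some 0) (some L)).flatMap (fun a =>
          (PySem.List.slice xs (some 1) (some L)).map (fun b => a + b)))).flatMap (fun p =>
        (PySem.List.slice xs (some 2) (some L)).map (fun c => p + c))) := by
  have hslice : ∀ d : Nat, PySem.List.slice xs (some (d : Int)) (some L) =
      (xs.drop d).take (L.toNat - d) := by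
    intro d
    rw [PySem.List.slice_toNat xs (by exact_mod_cast Int.natCast_nonneg d) hL0]
    simp
  have h0 := hslice 0; have h1 := hslice 1; have h2 := hslice 2
  simp only [Int.natCast_zero, Int.natCast_one] at h0 h1
  have h2' : PySem.List.slice xs (some 2) (some L) = (xs.drop 2).take (L.toNat - 2) := by
    exact_mod_cast h2
  simp only [List.mem_flatMap, List.mem_map, PySem.Set.mem_ofList, PySem.List.mem_pyRange_one,
    h0, h1, h2', Nat.sub_zero]
  constructor
  · rintro ⟨i, ⟨hi0, hiL⟩, k, ⟨hk1, hkL⟩, j, ⟨hj2, hjL⟩, rfl⟩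
    have hgi : PySem.List.pyGetD xs i 0 = xs[i.toNat]'(by omega) :=
      PySem.List.pyGetD_eq_getElem xs 0 hi0 (by omega)
    have hgk : PySem.List.pyGetD xs k 0 = xs[k.toNat]'(by omega) :=
      PySem.List.pyGetD_eq_getElem xs 0 (by omega) (by omega)
    have hgj : PySem.List.pyGetD xs j 0 = xs[j.toNat]'(by omega) :=
      PySem.List.pyGetD_eq_getElem xs 0 (by omega) (by omega)
    refine ⟨xs[i.toNat]'(by omega) + xs[k.toNat]'(by omega),
      ⟨xs[i.toNat]'(by omega), mem_drop_take.mpr ⟨i.toNat, ⟨by omega, by omega⟩, by simp⟩,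
       xs[k.toNat]'(by omega), mem_drop_take.mpr ⟨k.toNat - 1, ⟨by omega, by omega⟩, by
         congr 1 <;> omega⟩, by congr 2⟩,
      xs[j.toNat]'(by omega), mem_drop_take.mpr ⟨j.toNat - 2, ⟨by omega, by omega⟩, by
        congr 1 <;> omega⟩, ?_⟩
    rw [hgi, hgk, hgj]
  · rintro ⟨p, ⟨a, ha, b, hb, rfl⟩, c, hc, rfl⟩
    obtain ⟨mi, ⟨hmi, hmi'⟩, rfl⟩ := mem_drop_take.mp ha
    obtain ⟨mk, ⟨hmk, hmk'⟩, rfl⟩ := mem_drop_take.mp hb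
    obtain ⟨mj, ⟨hmj, hmj'⟩, rfl⟩ := mem_drop_take.mp hc
    refine ⟨(mi : Int), ⟨by omega, by omega⟩, ((1 + mk : Nat) : Int), ⟨by push_cast; omega, by push_cast; omega⟩,
      ((2 + mj : Nat) : Int), ⟨by push_cast; omega, by push_cast; omega⟩, ?_⟩
    rw [PySem.List.pyGetD_eq_getElem xs 0 (Int.natCast_nonneg _) (by push_cast; omega),
        PySem.List.pyGetD_eq_getElem xs 0 (Int.natCast_nonneg _) (by push_cast; omega),
        PySem.List.pyGetD_eq_getElem xs 0 (Int.natCast_nonneg _) (by push_cast; omega)]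
    simp only [Int.toNat_natCast, Nat.zero_add]

-- descending sort of two nodup lists with the same members is the same list
lemma sorted_rev_eq_of_same_mem (s t : List Int) (hs : s.Nodup) (ht : t.Nodup)
    (h : ∀ x, x ∈ s ↔ x ∈ t) :
    PySem.List.sorted s (fun x => x) true = PySem.List.sorted t (fun x => x) true := by
  have hperm : (PySem.List.sorted s (fun x => x) true).Perm t := by
    refine (PySem.List.sorted_perm s _ true).trans ?_
    exact (List.perm_ext_iff_of_nodup hs ht).mpr h
  have hge := PySem.List.sorted_pairwise_rev s (fun x => x) (κ := Int)
  have hnd : (PySem.List.sorted s (fun x => x) true).Nodup :=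
    ((PySem.List.sorted_perm s _ true).nodup_iff).mpr hs
  have hgt : (PySem.List.sorted s (fun x => x) true).Pairwise (fun a b => b < a) := by
    refine (hge.and hnd).imp ?_
    rintro a b ⟨hle, hne⟩
    omega
  exact Eq.symm (PySem.List.sorted_rev_eq_of_perm_of_pairwise_gt _ _ _ hperm hgt)

-- ===== VERDICT (by name: the statement is the Claim_ definition above) =====
theorem calculate_spec : Claim_equal_calculate := by
  intro L c xs _ hpre
  obtain ⟨hL0, hLlen, _⟩ := hpre
  show calculate L c xs = calculate_alt L c xs
  unfold calculate calculate_alt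
  simp only [PySem.List.foldl_append_singleton_eq_map, PySem.List.foldl_append_eq_flatMap,
    List.nil_append]
  congr 1
  apply sorted_rev_eq_of_same_mem
  · exact PySem.Set.nodup_ofList _
  · exact PySem.Set.nodup_ofList _
  · intro x
    simp only [PySem.Set.mem_ofList]
    exact sums_mem_iff L xs hL0 (by exact_mod_cast hLlen) x
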